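-- pv_equiv track=rewrite | github.com/skykatty/PY110-november-2018 | Tasks/generator.py | gena
-- ===== SOURCE A (Python) =====
-- def gena(string):
--     start = 0
--     while True:
--         try:
--             ind = string.index(" ", start, len(string))
--             yield string[start:ind]
--             start = ind + 1
--         except ValueError:
--             yield string[start:]
--             break
-- ===== SOURCE B (Python) =====
-- def gena(string):
--     buf = []
--     for ch in string:
--         if ch == " ":
--             yield "".join(buf)
--             buf = []
--         else:
--             buf.append(ch)
--     yield "".join(buf)
-- ===== Notes on version B (the rewrite author's own statement) =====
-- stated objective: alternative
-- what changed: replaces the exception-driven loop that repeatedly calls string.index and slices the string with a single character-by-character pass that accumulates the current token in a buffer and yields it at each space and once at the end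
import Mathlib
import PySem

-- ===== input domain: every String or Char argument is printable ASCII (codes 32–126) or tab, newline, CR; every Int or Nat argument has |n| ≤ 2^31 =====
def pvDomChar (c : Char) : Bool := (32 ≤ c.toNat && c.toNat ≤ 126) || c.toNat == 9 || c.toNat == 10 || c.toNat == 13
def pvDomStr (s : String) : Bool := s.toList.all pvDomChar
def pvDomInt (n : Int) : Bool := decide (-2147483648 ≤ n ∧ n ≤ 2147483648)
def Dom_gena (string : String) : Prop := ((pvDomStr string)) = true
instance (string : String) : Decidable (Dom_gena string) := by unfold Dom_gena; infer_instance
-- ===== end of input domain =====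

-- B replaces A's exception-driven string.index/slice loop by a single character pass
-- with a token buffer (objective: alternative decomposition, same cost).

-- ===== PORT A =====
-- A's loop state is the integer `start`; here the state is the still-unscanned
-- suffix `rest = string[start:]` (the same data): string.index(" ", start, len) becomes
-- PySem.Chars.find rest [' '] (ValueError ↔ -1), string[start:ind] becomes rest.take,
-- start = ind + 1 becomes rest.drop (ind + 1). Each yielded slice becomes a String at the end.
def genaGo (rest : List Char) : List (List Char) :=
  if h : PySem.Chars.find rest [' '] = -1 then
    [rest]
  else
    rest.take (PySem.Chars.find rest [' ']).toNat ::
      genaGo (rest.drop ((PySem.Chars.find rest [' ']).toNat + 1))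
termination_by rest.length
decreasing_by
  have hinf : [' '] <:+: rest := (PySem.Chars.find_ne_neg_one_iff rest [' ']).mp h
  have hne : rest ≠ [] := by rintro rfl; simpa using List.infix_nil.mp hinf
  have : 0 < rest.length := List.length_pos_iff.mpr hne
  simp only [List.length_drop]; omega

def gena (string : String) : List String :=
  (genaGo string.toList).map String.mk

-- ===== PORT B =====
-- B's loop: one pass over the characters, `buf` is the current token;
-- ''.join(buf) = String.mk buf, applied to each yielded token by the final map.
def genaAltGo (buf : List Char) : List Char → List (List Char)
  | [] => [buf]
  | c :: rest => if c = ' ' then buf :: genaAltGo [] rest else genaAltGo (buf ++ [c]) rest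

def gena_alt (string : String) : List String :=
  (genaAltGo [] string.toList).map String.mk

-- ===== PRECONDITION & SPEC =====
def Spec_gena (string : String) (out : List String) : Prop := out = gena_alt string
instance (string : String) (out : List String) : Decidable (Spec_gena string out) := by unfold Spec_gena; infer_instance

-- ===== CLAIM (what is proved, stated in full; the proofs are below) =====
def Claim_equal_gena : Prop := ∀ (string : String), Dom_gena string → Spec_gena string (gena string)

-- ===== LEMMAS AND PROOFS =====

-- prepend buf to the first token of a (nonempty) token list
def pvConsHead (buf : List Char) : List (List Char) → List (List Char)
  | [] => [buf]
  | t :: ts => (buf ++ t) :: ts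

lemma pv_infix_singleton {a : Char} {l : List Char} : [a] <:+: l ↔ a ∈ l := by
  constructor
  · intro h; exact List.singleton_sublist.mp h.sublist
  · intro h; obtain ⟨s, t, rfl⟩ := List.append_of_mem h; exact ⟨s, t, by simp⟩

lemma pv_find_cons_singleton (c a : Char) (rs : List Char) :
    PySem.Chars.find (c :: rs) [a] =
      if c = a then 0
      else if PySem.Chars.find rs [a] = -1 then -1 else PySem.Chars.find rs [a] + 1 := by
  by_cases hca : c = a
  · subst hca
    rw [if_pos rfl]
    have hinf : [c] <:+: (c :: rs) := pv_infix_singleton.mpr (by simp)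
    have hnn : 0 ≤ PySem.Chars.find (c :: rs) [c] :=
      (PySem.Chars.find_nonneg_iff _ _).mpr hinf
    obtain ⟨h1, h2⟩ := PySem.Chars.find_spec hnn
    have hpre : [c] <+: (c :: rs).drop 0 := by simp
    have h0 : (PySem.Chars.find (c :: rs) [c]).toNat = 0 := by
      by_contra h; exact h2 0 (Nat.pos_of_ne_zero h) hpre
    omega
  · rw [if_neg hca]
    by_cases hf : PySem.Chars.find rs [a] = -1
    · rw [if_pos hf]
      have hni : ¬ [a] <:+: rs := (PySem.Chars.find_eq_neg_one_iff rs [a]).mp hf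
      refine (PySem.Chars.find_eq_neg_one_iff _ _).mpr ?_
      intro h
      rcases List.mem_cons.mp (pv_infix_singleton.mp h) with h' | h'
      · exact hca h'.symm
      · exact hni (pv_infix_singleton.mpr h')
    · rw [if_neg hf]
      have hinf' : [a] <:+: rs := (PySem.Chars.find_ne_neg_one_iff rs [a]).mp hf
      have hnn' : 0 ≤ PySem.Chars.find rs [a] := (PySem.Chars.find_nonneg_iff _ _).mpr hinf'
      obtain ⟨h1', h2'⟩ := PySem.Chars.find_spec hnn'
      have hinf : [a] <:+: (c :: rs) :=
        pv_infix_singleton.mpr (List.mem_cons_of_mem _ (pv_infix_singleton.mp hinf'))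
      have hnn : 0 ≤ PySem.Chars.find (c :: rs) [a] := (PySem.Chars.find_nonneg_iff _ _).mpr hinf
      obtain ⟨h1, h2⟩ := PySem.Chars.find_spec hnn
      -- upper bound: a occurs at position (find rs).toNat + 1 in c :: rs
      have hocc : [a] <+: (c :: rs).drop ((PySem.Chars.find rs [a]).toNat + 1) := by
        simpa using h1'
      have hub : (PySem.Chars.find (c :: rs) [a]).toNat ≤ (PySem.Chars.find rs [a]).toNat + 1 := by
        by_contra h
        exact h2 _ (by omega) hocc
      -- lower bound
      have hlb : (PySem.Chars.find rs [a]).toNat + 1 ≤ (PySem.Chars.find (c :: rs) [a]).toNat := by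
        cases hk : (PySem.Chars.find (c :: rs) [a]).toNat with
        | zero =>
          exfalso
          rw [hk, List.drop_zero, List.cons_prefix_iff] at h1
          obtain ⟨l', hl', _⟩ := h1
          injection hl' with hh _
          exact hca hh
        | succ j =>
          rw [hk, List.drop_succ_cons] at h1
          have : ¬ j < (PySem.Chars.find rs [a]).toNat := fun hj => h2' j hj h1
          omega
      omega

lemma pv_genaGo_ne_nil (rest : List Char) : genaGo rest ≠ [] := by
  rw [genaGo]; split <;> simp

lemma pv_genaGo_cons (c : Char) (rs : List Char) :
    genaGo (c :: rs) = if c = ' ' then [] :: genaGo rs else pvConsHead [c] (genaGo rs) := by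
  rw [genaGo]
  by_cases hc : c = ' '
  · subst hc
    have h0 : PySem.Chars.find (' ' :: rs) [' '] = 0 := by
      rw [pv_find_cons_singleton]; simp
    simp [h0]
  · rw [if_neg hc]
    by_cases hf : PySem.Chars.find rs [' '] = -1
    · have ha : PySem.Chars.find (c :: rs) [' '] = -1 := by
        rw [pv_find_cons_singleton, if_neg hc, if_pos hf]
      rw [dif_pos ha]
      conv_rhs => rw [genaGo]
      rw [dif_pos hf]
      rfl
    · have hnn' : 0 ≤ PySem.Chars.find rs [' '] :=
        (PySem.Chars.find_nonneg_iff _ _).mpr ((PySem.Chars.find_ne_neg_one_iff rs [' ']).mp hf)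
      have ha : PySem.Chars.find (c :: rs) [' '] = PySem.Chars.find rs [' '] + 1 := by
        rw [pv_find_cons_singleton, if_neg hc, if_neg hf]
      have hane : ¬ PySem.Chars.find (c :: rs) [' '] = -1 := by omega
      rw [dif_neg hane]
      conv_rhs => rw [genaGo]
      rw [dif_neg hf]
      have htn : (PySem.Chars.find (c :: rs) [' ']).toNat = (PySem.Chars.find rs [' ']).toNat + 1 := by
        omega
      rw [htn]
      simp [pvConsHead, List.drop_succ_cons]

lemma pv_alt_eq (rest : List Char) : ∀ buf, genaAltGo buf rest = pvConsHead buf (genaGo rest) := by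
  induction rest with
  | nil =>
    intro buf
    have h0 : genaGo [] = [[]] := by
      rw [genaGo]
      rw [dif_pos ((PySem.Chars.find_eq_neg_one_iff _ _).mpr (by simp))]
    simp [genaAltGo, h0, pvConsHead]
  | cons c rs ih =>
    intro buf
    rw [pv_genaGo_cons]
    by_cases hc : c = ' '
    · subst hc
      simp only [genaAltGo]
      rw [ih []]
      obtain ⟨t, ts, ht⟩ := List.exists_cons_of_ne_nil (pv_genaGo_ne_nil rs)
      simp [ht, pvConsHead]
    · simp only [genaAltGo, if_neg hc]
      rw [ih (buf ++ [c])]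
      obtain ⟨t, ts, ht⟩ := List.exists_cons_of_ne_nil (pv_genaGo_ne_nil rs)
      simp [ht, pvConsHead]

-- ===== VERDICT (by name: the statement is the Claim_ definition above) =====
theorem gena_spec : Claim_equal_gena := by
  intro string _
  unfold Spec_gena gena gena_alt
  rw [pv_alt_eq]
  obtain ⟨t, ts, ht⟩ := List.exists_cons_of_ne_nil (pv_genaGo_ne_nil string.toList)
  simp [ht, pvConsHead]
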